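-- pv_equiv track=rewrite | github.com/itscomputers/ebe-python | primality.py | _lucas_sequence_by_index
-- ===== SOURCE A (Python) =====
-- def _lucas_double_index(U, V, Q, num):
--     """Shortcut to double the index of a Lucas sequence."""
--
--     return (
--         (U*V) % num,
--         (V*V - 2*Q) % num,
--         (Q**2) % num
--     )
--
-- def _lucas_index_plus_one(U, V, P, Q, Q1, num):
--     """Shortcut to increase the index of a Lucas sequence by one."""
--
--     return (
--         ((P*U + V) * (num + 1)//2) % num,
--         (((P**2 - 4*Q1)*U + P*V) * (num + 1)//2) % num,
--         (Q*Q1) % num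
--     )
--
-- def _lucas_sequence_by_index(k, P, Q, num):
--     """Explicit formula for any element of a Lucas sequence."""
--
--     if k == 0:
--         return (0, 2, 1)
--     elif k == 1:
--         return (1, P, Q)
--     elif k % 2 == 0:
--         U_, V_, Q_ = _lucas_sequence_by_index(k//2, P, Q, num)
--         return _lucas_double_index(U_, V_, Q_, num)
--     else:
--         U_, V_, Q_ = _lucas_sequence_by_index(k-1, P, Q, num)
--         return _lucas_index_plus_one(U_, V_, P, Q_, Q, num)
-- ===== SOURCE B (Python) =====
-- def _lucas_double_index(U, V, Q, num):
--     """Shortcut to double the index of a Lucas sequence."""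
--
--     return (
--         (U*V) % num,
--         (V*V - 2*Q) % num,
--         (Q**2) % num
--     )
--
-- def _lucas_index_plus_one(U, V, P, Q, Q1, num):
--     """Shortcut to increase the index of a Lucas sequence by one."""
--
--     return (
--         ((P*U + V) * (num + 1)//2) % num,
--         (((P**2 - 4*Q1)*U + P*V) * (num + 1)//2) % num,
--         (Q*Q1) % num
--     )
--
-- def _lucas_sequence_by_index(k, P, Q, num):
--     """Iterative double-and-add ladder over the bits of k (MSB first)."""
--
--     if k == 0:
--         return (0, 2, 1)
--     bits = []
--     m = k
--     while m > 1:
--         bits.append(m % 2)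
--         m //= 2
--     U, V, Qk = 1, P, Q
--     for bit in reversed(bits):
--         U, V, Qk = _lucas_double_index(U, V, Qk, num)
--         if bit == 1:
--             U, V, Qk = _lucas_index_plus_one(U, V, P, Qk, Q, num)
--     return (U, V, Qk)
-- ===== Notes on version B (the rewrite author's own statement) =====
-- stated objective: alternative
-- what changed: Replaced the top-down recursion on k with an iterative double-and-add ladder over the bits of k (MSB first), reusing the same two modular-step helpers; it trades recursion for an explicit bit list and a single loop.
import Mathlib
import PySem

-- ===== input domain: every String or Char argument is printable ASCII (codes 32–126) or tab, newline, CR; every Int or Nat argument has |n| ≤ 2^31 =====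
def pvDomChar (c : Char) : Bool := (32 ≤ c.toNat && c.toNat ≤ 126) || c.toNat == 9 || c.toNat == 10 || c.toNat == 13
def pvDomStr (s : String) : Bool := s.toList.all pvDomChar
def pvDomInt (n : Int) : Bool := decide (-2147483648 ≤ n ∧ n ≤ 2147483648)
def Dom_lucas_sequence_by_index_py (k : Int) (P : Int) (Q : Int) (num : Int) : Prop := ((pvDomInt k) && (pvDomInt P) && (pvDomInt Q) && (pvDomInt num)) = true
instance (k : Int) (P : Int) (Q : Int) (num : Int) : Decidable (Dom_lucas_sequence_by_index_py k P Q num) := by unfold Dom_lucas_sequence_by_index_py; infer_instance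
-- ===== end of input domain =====

-- B replaces A's recursion on k with an iterative double-and-add ladder over k's bits (same modular-step helpers, return value only).


-- ===== PORT A =====
-- B reuses the same modular step helpers as A (ported once, used by both ports).
def lucasDouble (U : Int) (V : Int) (Q : Int) (num : Int) : Int × Int × Int :=
  (PySem.Int.mod (U*V) num, PySem.Int.mod (V*V - 2*Q) num, PySem.Int.mod (Q^2) num)

def lucasPlusOne (U : Int) (V : Int) (P : Int) (Q : Int) (Q1 : Int) (num : Int) : Int × Int × Int :=
  (PySem.Int.mod (PySem.Int.floordiv ((P*U + V) * (num + 1)) 2) num,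
   PySem.Int.mod (PySem.Int.floordiv (((P^2 - 4*Q1)*U + P*V) * (num + 1)) 2) num,
   PySem.Int.mod (Q*Q1) num)

-- fuel makes A's recursion total in Lean; k.toNat + 1 steps suffice for every k ≥ 0.
def goA (fuel : Nat) (k : Int) (P : Int) (Q : Int) (num : Int) : Int × Int × Int :=
  match fuel with
  | 0 => (0, 0, 0)
  | fuel + 1 =>
    if k = 0 then (0, 2, 1)
    else if k = 1 then (1, P, Q)
    else if PySem.Int.mod k 2 = 0 then
      let t := goA fuel (PySem.Int.floordiv k 2) P Q num
      lucasDouble t.1 t.2.1 t.2.2 num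
    else
      let t := goA fuel (k - 1) P Q num
      lucasPlusOne t.1 t.2.1 P t.2.2 Q num

def lucas_sequence_by_index_py (k : Int) (P : Int) (Q : Int) (num : Int) : Int × Int × Int :=
  goA (k.toNat + 1) k P Q num

-- ===== PORT B =====
-- bits of n below the most significant one, LSB first (the while-loop in Source B)
def pvBitsRev (n : Nat) : List Nat :=
  if n ≤ 1 then [] else n % 2 :: pvBitsRev (n / 2)
decreasing_by exact Nat.div_lt_self (by omega) (by omega)

def lucas_sequence_by_index_py_alt (k : Int) (P : Int) (Q : Int) (num : Int) : Int × Int × Int :=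
  if k = 0 then (0, 2, 1)
  else
    (pvBitsRev k.toNat).reverse.foldl
      (fun t b =>
        let d := lucasDouble t.1 t.2.1 t.2.2 num
        if b = 1 then lucasPlusOne d.1 d.2.1 P d.2.2 Q num else d)
      (1, P, Q)

-- ===== PRECONDITION & SPEC =====
-- A raises RecursionError for k < 0 and ZeroDivisionError for num = 0; those inputs are excluded.
def Pre_lucas_sequence_by_index_py (k : Int) (P : Int) (Q : Int) (num : Int) : Prop :=
  0 ≤ k ∧ num ≠ 0
instance (k : Int) (P : Int) (Q : Int) (num : Int) : Decidable (Pre_lucas_sequence_by_index_py k P Q num) := by unfold Pre_lucas_sequence_by_index_py; infer_instance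

def pvWitness_lucas_sequence_by_index_py : Int × Int × Int × Int := (13, 3, -1, 7)

def Spec_lucas_sequence_by_index_py (k : Int) (P : Int) (Q : Int) (num : Int) (out : Int × Int × Int) : Prop := out = lucas_sequence_by_index_py_alt k P Q num
instance (k : Int) (P : Int) (Q : Int) (num : Int) (out : Int × Int × Int) : Decidable (Spec_lucas_sequence_by_index_py k P Q num out) := by unfold Spec_lucas_sequence_by_index_py; infer_instance

-- ===== CLAIM (what is proved, stated in full; the proofs are below) =====
def Claim_equal_lucas_sequence_by_index_py : Prop := ∀ (k : Int) (P : Int) (Q : Int) (num : Int), Dom_lucas_sequence_by_index_py k P Q num → Pre_lucas_sequence_by_index_py k P Q num → Spec_lucas_sequence_by_index_py k P Q num (lucas_sequence_by_index_py k P Q num)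

-- ===== LEMMAS AND PROOFS =====
lemma pvBitsRev_reverse_eq (n : Nat) (h : 2 ≤ n) :
    (pvBitsRev n).reverse = (pvBitsRev (n / 2)).reverse ++ [n % 2] := by
  rw [pvBitsRev]; simp [Nat.not_le.mpr (by omega : 1 < n)]

lemma goA_eq_foldl (P Q num : Int) : ∀ (fuel n : Nat), 1 ≤ n → n ≤ fuel →
    goA fuel (n : Int) P Q num =
      (pvBitsRev n).reverse.foldl
        (fun t b =>
          let d := lucasDouble t.1 t.2.1 t.2.2 num
          if b = 1 then lucasPlusOne d.1 d.2.1 P d.2.2 Q num else d)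
        (1, P, Q) := by
  intro fuel
  induction fuel with
  | zero => intro n h1 h2; omega
  | succ fuel ih =>
    intro n h1 h2
    rcases Nat.lt_or_ge n 2 with hn | hn
    · -- n = 1
      have : n = 1 := by omega
      subst this
      simp [goA, pvBitsRev]
    · have hcast0 : ((n : Int) ≠ 0) := by exact_mod_cast (by omega : n ≠ 0)
      have hcast1 : ((n : Int) ≠ 1) := by exact_mod_cast (by omega : n ≠ 1)
      rcases Nat.even_or_odd n with he | ho
      · -- even n ≥ 2: double step, bit 0
        have hmod : n % 2 = 0 := Nat.even_iff.mp he
        have hd2 : PySem.Int.floordiv (n : Int) 2 = ((n / 2 : Nat) : Int) :=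
          PySem.Int.floordiv_natCast n 2
        have hm2 : PySem.Int.mod (n : Int) 2 = 0 := by
          rw [show ((2:Int)) = ((2:Nat):Int) by norm_num, PySem.Int.mod_natCast, hmod]; rfl
        rw [goA, if_neg hcast0, if_neg hcast1, if_pos hm2, hd2,
          ih (n / 2) (by omega) (by omega),
          pvBitsRev_reverse_eq n hn, List.foldl_append, hmod]
        simp [List.foldl]
      · -- odd n ≥ 3: plus-one after double, bit 1
        have hmod : n % 2 = 1 := Nat.odd_iff.mp ho
        have hn3 : 3 ≤ n := by omega
        have hm2 : PySem.Int.mod (n : Int) 2 ≠ 0 := by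
          rw [show ((2:Int)) = ((2:Nat):Int) by norm_num, PySem.Int.mod_natCast, hmod]
          norm_num
        have hsub : (n : Int) - 1 = ((n - 1 : Nat) : Int) := by push_cast [Nat.cast_sub (by omega : 1 ≤ n)]; ring
        rw [goA, if_neg hcast0, if_neg hcast1, if_neg hm2, hsub,
          ih (n - 1) (by omega) (by omega),
          pvBitsRev_reverse_eq (n - 1) (by omega), List.foldl_append,
          show (n - 1) % 2 = 0 by omega,
          show (n - 1) / 2 = n / 2 by omega,
          pvBitsRev_reverse_eq n hn, List.foldl_append, hmod]
        simp [List.foldl]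

-- ===== VERDICT (by name: the statement is the Claim_ definition above) =====
theorem lucas_sequence_by_index_py_spec : Claim_equal_lucas_sequence_by_index_py := by
  intro k P Q num _ hpre
  obtain ⟨hk, hnum⟩ := hpre
  unfold Spec_lucas_sequence_by_index_py lucas_sequence_by_index_py lucas_sequence_by_index_py_alt
  by_cases hk0 : k = 0
  · subst hk0; simp [goA]
  · have hcast : k = ((k.toNat : Nat) : Int) := (Int.toNat_of_nonneg hk).symm
    rw [if_neg hk0]
    conv_lhs => rw [hcast]
    exact goA_eq_foldl P Q num (k.toNat + 1) k.toNat (by omega) (by omega)
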